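-- pv_equiv track=rewrite | github.com/roeimichael/TheseSandBox | models/bayes_mlp_pyro.py | _build_prior_params
-- ===== SOURCE A (Python) =====
-- from typing import List, Dict, Tuple, Iterable
--
-- def _build_prior_params(input_dim: int, hidden_sizes: List[int]) -> List[Tuple[int, int]]:
--     sizes = []
--     prev = input_dim
--     for hs in hidden_sizes:
--         sizes.append((prev, hs))
--         prev = hs
--     sizes.append((prev, 1))
--     return sizes
-- ===== SOURCE B (Python) =====
-- from typing import List, Tuple
--
-- def _build_prior_params(input_dim: int, hidden_sizes: List[int]) -> List[Tuple[int, int]]: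
--     # Index-based formulation: layer i (0..n) maps node-count at position i
--     # to node-count at position i+1, where position 0 is input_dim, positions
--     # 1..n are the hidden sizes, and position n+1 is the output size 1.
--     # All list indexing is in range by construction.
--     n = len(hidden_sizes)
--     return [(input_dim if i == 0 else hidden_sizes[i - 1],
--              1 if i == n else hidden_sizes[i])
--             for i in range(n + 1)]
-- ===== Notes on version B (the rewrite author's own statement) =====
-- stated objective: alternative
-- what changed: Replaces the sequential loop carrying a running 'prev' accumulator by a closed index-based formulation: layer i is read off directly by random access (input_dim or hidden_sizes[i-1], hidden_sizes[i] or 1) for i in range(n+1), with no carried state between iterations.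
import Mathlib
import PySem

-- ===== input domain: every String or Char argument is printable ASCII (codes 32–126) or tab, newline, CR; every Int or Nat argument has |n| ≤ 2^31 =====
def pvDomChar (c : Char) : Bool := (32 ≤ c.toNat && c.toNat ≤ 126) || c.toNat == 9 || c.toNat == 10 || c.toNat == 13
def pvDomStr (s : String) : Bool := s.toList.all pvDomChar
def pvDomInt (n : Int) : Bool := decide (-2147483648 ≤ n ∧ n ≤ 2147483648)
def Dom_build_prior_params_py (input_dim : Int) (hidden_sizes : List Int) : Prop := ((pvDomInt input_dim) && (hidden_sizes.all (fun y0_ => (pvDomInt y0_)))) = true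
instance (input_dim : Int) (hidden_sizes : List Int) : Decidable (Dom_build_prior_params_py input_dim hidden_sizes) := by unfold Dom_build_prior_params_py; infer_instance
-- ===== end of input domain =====

-- B replaces A's stateful accumulator loop by a stateless index-based formulation (alternative decomposition, same cost).

-- ===== PORT A =====
-- A: loop with running 'prev' accumulator appending (prev, hs), then the final (prev, 1)
def build_prior_params_py (input_dim : Int) (hidden_sizes : List Int) : List (Int × Int) :=
  let st := hidden_sizes.foldl (fun (p : List (Int × Int) × Int) hs => (p.1 ++ [(p.2, hs)], hs)) ([], input_dim)
  st.1 ++ [(st.2, 1)]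

-- ===== PORT B =====
-- B: layer i for i in range(n+1), each read off by random access; the branches keep every
-- index in range, so getD's default is never consulted (matches hidden_sizes[i] exactly)
def build_prior_params_py_alt (input_dim : Int) (hidden_sizes : List Int) : List (Int × Int) :=
  let n := hidden_sizes.length
  (List.range (n + 1)).map (fun i =>
    (if i = 0 then input_dim else hidden_sizes.getD (i - 1) 0,
     if i = n then 1 else hidden_sizes.getD i 0))

-- ===== PRECONDITION & SPEC =====
def Spec_build_prior_params_py (input_dim : Int) (hidden_sizes : List Int) (out : List (Int × Int)) : Prop := out = build_prior_params_py_alt input_dim hidden_sizes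
instance (input_dim : Int) (hidden_sizes : List Int) (out : List (Int × Int)) : Decidable (Spec_build_prior_params_py input_dim hidden_sizes out) := by unfold Spec_build_prior_params_py; infer_instance

-- ===== CLAIM (what is proved, stated in full; the proofs are below) =====
def Claim_equal_build_prior_params_py : Prop := ∀ (input_dim : Int) (hidden_sizes : List Int), Dom_build_prior_params_py input_dim hidden_sizes → Spec_build_prior_params_py input_dim hidden_sizes (build_prior_params_py input_dim hidden_sizes)

-- ===== LEMMAS AND PROOFS =====
-- bridge: the common recursive characterization of the layer list
def pvLayers (prev : Int) : List Int → List (Int × Int)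
  | [] => [(prev, 1)]
  | h :: t => (prev, h) :: pvLayers h t

lemma foldA_eq (prev : Int) (hs : List Int) (acc : List (Int × Int)) :
    (let st := hs.foldl (fun (p : List (Int × Int) × Int) h => (p.1 ++ [(p.2, h)], h)) (acc, prev)
     st.1 ++ [(st.2, 1)])
      = acc ++ pvLayers prev hs := by
  induction hs generalizing prev acc with
  | nil => simp [pvLayers]
  | cons h t ih => simpa [pvLayers] using ih h (acc ++ [(prev, h)])

lemma altB_eq (prev : Int) (hs : List Int) :
    build_prior_params_py_alt prev hs = pvLayers prev hs := by
  induction hs generalizing prev with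
  | nil => simp [build_prior_params_py_alt, pvLayers]
  | cons h t ih =>
      unfold build_prior_params_py_alt pvLayers
      simp only [List.length_cons]
      rw [List.range_succ_eq_map]
      simp only [List.map_cons, List.map_map]
      refine congrArg₂ _ (by simp) ?_
      rw [← ih h]
      unfold build_prior_params_py_alt
      simp only []
      refine List.map_congr_left (fun i _ => ?_)
      simp only [Function.comp_apply, Nat.succ_ne_zero, if_false, List.getD_cons_succ]
      rcases i with _ | k
      · cases t <;> simp
      · simp [List.getD]

-- ===== VERDICT (by name: the statement is the Claim_ definition above) =====
theorem build_prior_params_py_spec : Claim_equal_build_prior_params_py := by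
  intro input_dim hidden_sizes _
  unfold Spec_build_prior_params_py build_prior_params_py
  rw [altB_eq]
  simpa using foldA_eq input_dim hidden_sizes []
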